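-- pv_equiv track=rewrite | github.com/carotesel/Fundamentos-Guarna | Listas/ejInicial/ej1.py | mostrar_pares
-- ===== SOURCE A (Python) =====
-- def mostrar_pares(lista):
--     pares_encontrados = 0
--     resultado = []
--
--     for num in lista:
--         if pares_encontrados < 3:
--             resultado.append(num)
--             if num % 2 == 0:
--                 pares_encontrados += 1
--     return resultado
-- ===== SOURCE B (Python) =====
-- def mostrar_pares(lista):
--     seq = list(lista)
--     count = 0
--     for i, num in enumerate(seq):
--         if num % 2 == 0:
--             count += 1
--             if count == 3:
--                 return seq[:i + 1]
--     return seq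
-- ===== Notes on version B (the rewrite author's own statement) =====
-- stated objective: simpler
-- what changed: Replaces the append-while-counting accumulator loop by locating the index of the third even element (enumerate scan that stops early) and returning a slice up to it, or the whole list if fewer than three evens.
import Mathlib
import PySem

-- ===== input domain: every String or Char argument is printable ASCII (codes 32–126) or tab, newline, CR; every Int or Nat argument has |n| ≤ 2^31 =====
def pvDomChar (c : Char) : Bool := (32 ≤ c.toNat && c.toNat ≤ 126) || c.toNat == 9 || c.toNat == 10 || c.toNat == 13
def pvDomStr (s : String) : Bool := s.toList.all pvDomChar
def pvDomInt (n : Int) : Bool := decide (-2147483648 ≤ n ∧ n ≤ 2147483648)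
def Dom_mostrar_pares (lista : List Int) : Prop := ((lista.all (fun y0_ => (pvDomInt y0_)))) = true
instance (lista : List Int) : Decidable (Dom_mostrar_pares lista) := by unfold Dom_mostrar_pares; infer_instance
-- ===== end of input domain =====

-- B replaces A's append-while-counting loop by locating the index of the third even
-- element and slicing up to it (objective: simpler decomposition; same cost).

-- ===== PORT A =====
-- A: fold over the list carrying (pares_encontrados, resultado); append while fewer
-- than three evens seen, then keep the state untouched for the rest of the list.
def pvStepA (s : Int × List Int) (num : Int) : Int × List Int :=
  if s.1 < 3 then
    ((if PySem.Int.mod num 2 == 0 then s.1 + 1 else s.1), s.2 ++ [num])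
  else s

def mostrar_pares (lista : List Int) : List Int :=
  (lista.foldl pvStepA ((0 : Int), ([] : List Int))).2

-- ===== PORT B =====
-- B: enumerate-scan for the index of the third even (early return), then slice.
def pvFindThird : List Int → Int → Nat → Option Nat
  | [], _, _ => none
  | num :: rest, count, i =>
    if PySem.Int.mod num 2 == 0 then
      if count + 1 == 3 then some i
      else pvFindThird rest (count + 1) (i + 1)
    else pvFindThird rest count (i + 1)

def mostrar_pares_alt (lista : List Int) : List Int :=
  match pvFindThird lista 0 0 with
  | some i => PySem.List.slice lista none (some ((i : Int) + 1))   -- seq[:i+1]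
  | none => lista

-- ===== PRECONDITION & SPEC =====
def Spec_mostrar_pares (lista : List Int) (out : List Int) : Prop := out = mostrar_pares_alt lista
instance (lista : List Int) (out : List Int) : Decidable (Spec_mostrar_pares lista out) := by unfold Spec_mostrar_pares; infer_instance

-- ===== CLAIM (what is proved, stated in full; the proofs are below) =====
def Claim_equal_mostrar_pares : Prop := ∀ (lista : List Int), Dom_mostrar_pares lista → Spec_mostrar_pares lista (mostrar_pares lista)

-- ===== LEMMAS AND PROOFS =====

theorem pvStepA_stuck (l : List Int) (c : Int) (acc : List Int) (h : ¬ c < 3) :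
    l.foldl pvStepA (c, acc) = (c, acc) := by
  induction l with
  | nil => rfl
  | cons num rest ih => simp [List.foldl, pvStepA, h, ih]

theorem pvFindThird_shift (l : List Int) (c : Int) (i : Nat) :
    pvFindThird l c i = (pvFindThird l c 0).map (fun j => j + i) := by
  induction l generalizing c i with
  | nil => simp [pvFindThird]
  | cons num rest ih =>
    simp only [pvFindThird]
    split_ifs with h1 h2
    · simp
    · rw [ih (c + 1) (i + 1), ih (c + 1) 1]
      cases pvFindThird rest (c + 1) 0 <;> simp <;> omega
    · rw [ih c (i + 1), ih c 1]
      cases pvFindThird rest c 0 <;> simp <;> omega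

theorem pvFold_eq_find (l : List Int) (c : Int) (acc : List Int)
    (h : c < 3) :
    (l.foldl pvStepA (c, acc)).2 =
      (match pvFindThird l c 0 with
       | some i => acc ++ l.take (i + 1)
       | none => acc ++ l) := by
  induction l generalizing c acc with
  | nil => simp [pvFindThird]
  | cons num rest ih =>
    simp only [List.foldl, pvStepA, if_pos h]
    by_cases he : PySem.Int.mod num 2 == 0
    · by_cases h3 : c + 1 == 3
      · have hc3 : (c + 1 : Int) = 3 := by simpa using h3
        rw [if_pos he]
        simp only [hc3]
        rw [pvStepA_stuck rest 3 (acc ++ [num]) (by omega)]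
        simp only [pvFindThird, he, h3, if_true]
        simp
      · have hlt : (c + 1 : Int) < 3 := by
          have : (c + 1 : Int) ≠ 3 := by simpa using h3
          omega
        rw [if_pos he, ih (c + 1) (acc ++ [num]) hlt]
        simp only [pvFindThird, he, if_pos, h3]
        rw [pvFindThird_shift rest (c + 1) 1]
        cases pvFindThird rest (c + 1) 0 with
        | none => simp
        | some j => simp [List.take_succ_cons, List.append_assoc]
    · rw [if_neg he, ih c (acc ++ [num]) h]
      simp only [pvFindThird, he]
      rw [pvFindThird_shift rest c 1]
      cases pvFindThird rest c 0 with
      | none => simp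
      | some j => simp [List.take_succ_cons, List.append_assoc]

-- ===== VERDICT (by name: the statement is the Claim_ definition above) =====
theorem mostrar_pares_spec : Claim_equal_mostrar_pares := by
  intro lista _
  unfold Spec_mostrar_pares mostrar_pares mostrar_pares_alt
  rw [pvFold_eq_find lista 0 [] (by omega)]
  cases h : pvFindThird lista 0 0 with
  | none => simp
  | some i =>
    dsimp only
    have hcast : ((i : Int) + 1) = ((i + 1 : Nat) : Int) := by push_cast; ring
    rw [hcast, PySem.List.slice_to_natCast]
    simp
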